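-- pv_equiv track=rewrite | github.com/hflash/HybdridSchedulingwithKnitting | CircuitCutting/performanceAccessing.py | _bfs_region
-- ===== SOURCE A (Python) =====
-- def _bfs_region(adj, start, k, excluded=None):
--     """
--     从start出发的BFS，收集前k个可达节点，返回列表（若不足k则返回实际数量）。
--     excluded: 需要跳过的比特集合。
--     """
--     excluded = set(excluded) if excluded else set()
--     visited = set()
--     order = []
--     if start in excluded:
--         return order
--     queue = [start]
--     while queue and len(order) < k:
--         node = queue.pop(0)
--         if node in visited or node in excluded:
--             continue
--         visited.add(node)
--         order.append(node)
--         # 邻居排序以稳定输出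
--         for nb in sorted(adj.get(node, [])):
--             if nb not in visited and nb not in excluded:
--                 queue.append(nb)
--     return order
-- ===== SOURCE B (Python) =====
-- def _bfs_region(adj, start, k, excluded=None):
--     """Level-by-level BFS collecting the first k reachable nodes."""
--     excluded = set(excluded) if excluded else set()
--     visited = set()
--     order = []
--     if start in excluded:
--         return order
--     frontier = [start]
--     while frontier and len(order) < k:
--         next_frontier = []
--         for node in frontier:
--             if len(order) >= k:
--                 break
--             if node in visited or node in excluded:
--                 continue
--             visited.add(node)
--             order.append(node)
--             next_frontier += [nb for nb in sorted(adj.get(node, []))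
--                               if nb not in visited and nb not in excluded]
--         frontier = next_frontier
--     return order
-- ===== Notes on version B (the rewrite author's own statement) =====
-- stated objective: alternative
-- what changed: Replaced the single FIFO queue with quadratic pop(0) by a level-by-level BFS maintaining a current frontier and a next-frontier list (nested loop over generations, comprehension-built neighbour batches), emitting the identical node sequence.
import Mathlib
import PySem

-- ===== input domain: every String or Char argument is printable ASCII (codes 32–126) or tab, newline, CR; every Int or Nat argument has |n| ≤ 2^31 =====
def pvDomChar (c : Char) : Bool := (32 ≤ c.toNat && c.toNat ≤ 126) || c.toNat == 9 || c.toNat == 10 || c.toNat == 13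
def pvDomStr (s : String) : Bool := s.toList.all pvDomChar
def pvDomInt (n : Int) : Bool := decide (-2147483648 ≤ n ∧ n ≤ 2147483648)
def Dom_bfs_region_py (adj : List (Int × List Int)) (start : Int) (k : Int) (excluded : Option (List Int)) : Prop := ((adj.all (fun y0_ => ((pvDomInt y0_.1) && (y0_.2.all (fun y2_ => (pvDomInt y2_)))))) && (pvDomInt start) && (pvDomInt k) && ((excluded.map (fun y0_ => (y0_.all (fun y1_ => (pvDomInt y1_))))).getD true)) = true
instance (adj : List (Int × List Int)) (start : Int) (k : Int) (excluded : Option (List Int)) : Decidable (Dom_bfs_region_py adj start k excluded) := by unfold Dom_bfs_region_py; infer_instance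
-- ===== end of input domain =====

-- B replaces A's single FIFO queue (with quadratic pop(0)) by a level-by-level BFS with a
-- frontier / next-frontier pair; same node sequence, proved equal on the whole domain.
-- Both loops carry a Nat fuel argument purely as a totality guard; pvFuel is always sufficient
-- (each loop step pops one element and at most len(adj[node]) elements are ever enqueued per
-- distinct node), and the equivalence theorem holds for every fuel value anyway.

-- fuel bound: total queued elements ≤ 1 (start) + sum of all adjacency-list lengths
def pvFuel (adj : List (Int × List Int)) : Nat :=
  adj.foldl (fun a p => a + p.2.length) 0 + 2

-- excluded = set(excluded) if excluded else set()
def pvExcSet (excluded : Option (List Int)) : PySem.Set Int :=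
  match excluded with
  | none => PySem.Set.empty
  | some l => if l.isEmpty then PySem.Set.empty else PySem.Set.ofList l

-- sorted(adj.get(node, []))
def pvNbrs (adj : List (Int × List Int)) (node : Int) : List Int :=
  PySem.List.sorted ((PySem.Dict.mk adj).getD node []) (fun x => x) false

-- ===== PORT A =====
-- while queue and len(order) < k: node = queue.pop(0); …
def bfsLoopA (adj : List (Int × List Int)) (exc : PySem.Set Int) (k : Int) :
    Nat → PySem.Set Int → List Int → List Int → List Int
  | _, _, ord, [] => ord
  | 0, _, ord, _ :: _ => ord
  | fuel + 1, vis, ord, node :: rest =>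
    if (ord.length : Int) < k then
      if PySem.Set.contains vis node || PySem.Set.contains exc node then
        bfsLoopA adj exc k fuel vis ord rest
      else
        bfsLoopA adj exc k fuel (PySem.Set.add vis node) (ord ++ [node])
          ((pvNbrs adj node).foldl
            (fun q nb =>
              if !(PySem.Set.contains (PySem.Set.add vis node) nb)
                  && !(PySem.Set.contains exc nb) then q ++ [nb] else q)
            rest)
    else ord

def bfs_region_py (adj : List (Int × List Int)) (start : Int) (k : Int) (excluded : Option (List Int)) : List Int :=
  if PySem.Set.contains (pvExcSet excluded) start then []
  else bfsLoopA adj (pvExcSet excluded) k (pvFuel adj) PySem.Set.empty [] [start]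

-- ===== PORT B =====
-- inner 'for node in frontier' loop of one level; returns (remaining fuel, visited, order,
-- next_frontier, fuel-exhausted flag)
def bfsInnerB (adj : List (Int × List Int)) (exc : PySem.Set Int) (k : Int) :
    List Int → Nat → PySem.Set Int → List Int → List Int →
      Nat × PySem.Set Int × List Int × List Int × Bool
  | [], fuel, vis, ord, nx => (fuel, vis, ord, nx, false)
  | node :: rest, fuel, vis, ord, nx =>
    if (ord.length : Int) < k then
      match fuel with
      | 0 => (0, vis, ord, nx, true)
      | fuel + 1 =>
        if PySem.Set.contains vis node || PySem.Set.contains exc node then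
          bfsInnerB adj exc k rest fuel vis ord nx
        else
          bfsInnerB adj exc k rest fuel (PySem.Set.add vis node) (ord ++ [node])
            (nx ++ (pvNbrs adj node).filter
              (fun nb => !(PySem.Set.contains (PySem.Set.add vis node) nb)
                          && !(PySem.Set.contains exc nb)))
    else (fuel, vis, ord, nx, false)

theorem bfsInnerB_fuel_le (adj : List (Int × List Int)) (exc : PySem.Set Int) (k : Int) :
    ∀ (fr : List Int) (fuel : Nat) (vis : PySem.Set Int) (ord nx : List Int),
      (bfsInnerB adj exc k fr fuel vis ord nx).1 ≤ fuel := by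
  intro fr
  induction fr with
  | nil => intro fuel vis ord nx; simp [bfsInnerB]
  | cons node rest ih =>
    intro fuel vis ord nx
    cases fuel with
    | zero => simp only [bfsInnerB]; split <;> simp
    | succ f =>
      simp only [bfsInnerB]
      split
      · split
        · exact le_trans (ih f _ _ _) (Nat.le_succ f)
        · exact le_trans (ih f _ _ _) (Nat.le_succ f)
      · exact le_refl _

theorem bfsInnerB_fuel_lt (adj : List (Int × List Int)) (exc : PySem.Set Int) (k : Int)
    (node : Int) (rest : List Int) (fuel : Nat) (vis : PySem.Set Int) (ord nx : List Int)
    (hk : (ord.length : Int) < k)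
    (hstop : (bfsInnerB adj exc k (node :: rest) fuel vis ord nx).2.2.2.2 = false) :
    (bfsInnerB adj exc k (node :: rest) fuel vis ord nx).1 < fuel := by
  cases fuel with
  | zero => simp [bfsInnerB, hk] at hstop
  | succ f =>
    simp only [bfsInnerB, if_pos hk]
    split
    · exact Nat.lt_succ_of_le (bfsInnerB_fuel_le adj exc k rest f _ _ _)
    · exact Nat.lt_succ_of_le (bfsInnerB_fuel_le adj exc k rest f _ _ _)

-- outer 'while frontier and len(order) < k' loop
def bfsOuterB (adj : List (Int × List Int)) (exc : PySem.Set Int) (k : Int) :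
    Nat → List Int → PySem.Set Int → List Int → List Int
  | fuel, frontier, vis, ord =>
    match hfr : frontier with
    | [] => ord
    | node :: rest =>
      if hk : (ord.length : Int) < k then
        match hin : bfsInnerB adj exc k (node :: rest) fuel vis ord [] with
        | (f', vis', ord', nx', stop) =>
          if hstop : stop then ord'
          else bfsOuterB adj exc k f' nx' vis' ord'
      else ord
  termination_by fuel _ _ _ => fuel
  decreasing_by
    have := bfsInnerB_fuel_lt adj exc k node rest fuel vis ord [] hk
        (by rw [hin]; simpa using hstop)
    rw [hin] at this
    exact this

def bfs_region_py_alt (adj : List (Int × List Int)) (start : Int) (k : Int) (excluded : Option (List Int)) : List Int :=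
  if PySem.Set.contains (pvExcSet excluded) start then []
  else bfsOuterB adj (pvExcSet excluded) k (pvFuel adj) [start] PySem.Set.empty []

-- ===== PRECONDITION & SPEC =====
def Spec_bfs_region_py (adj : List (Int × List Int)) (start : Int) (k : Int) (excluded : Option (List Int)) (out : List Int) : Prop := out = bfs_region_py_alt adj start k excluded
instance (adj : List (Int × List Int)) (start : Int) (k : Int) (excluded : Option (List Int)) (out : List Int) : Decidable (Spec_bfs_region_py adj start k excluded out) := by unfold Spec_bfs_region_py; infer_instance

-- ===== CLAIM (what is proved, stated in full; the proofs are below) =====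
def Claim_equal_bfs_region_py : Prop := ∀ (adj : List (Int × List Int)) (start : Int) (k : Int) (excluded : Option (List Int)), Dom_bfs_region_py adj start k excluded → Spec_bfs_region_py adj start k excluded (bfs_region_py adj start k excluded)

-- ===== LEMMAS AND PROOFS =====

-- when the order list is already full, A's loop returns it unchanged
theorem bfsLoopA_of_full (adj : List (Int × List Int)) (exc : PySem.Set Int) (k : Int)
    (fuel : Nat) (vis : PySem.Set Int) (ord q : List Int)
    (hk : ¬ (ord.length : Int) < k) : bfsLoopA adj exc k fuel vis ord q = ord := by
  cases q with
  | nil => cases fuel <;> simp [bfsLoopA]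
  | cons a t => cases fuel <;> simp [bfsLoopA, hk]

-- one level of B simulates A's FIFO loop: A's queue is frontier ++ next_frontier
theorem bfsLoopA_eq_inner (adj : List (Int × List Int)) (exc : PySem.Set Int) (k : Int) :
    ∀ (fr : List Int) (fuel : Nat) (vis : PySem.Set Int) (ord nx : List Int),
      bfsLoopA adj exc k fuel vis ord (fr ++ nx) =
        (match bfsInnerB adj exc k fr fuel vis ord nx with
         | (f', vis', ord', nx', stop) =>
           if stop then ord' else bfsLoopA adj exc k f' vis' ord' nx') := by
  intro fr
  induction fr with
  | nil => intro fuel vis ord nx; simp [bfsInnerB]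
  | cons node rest ih =>
    intro fuel vis ord nx
    by_cases hk : (ord.length : Int) < k
    · cases fuel with
      | zero => simp [bfsLoopA, bfsInnerB, hk]
      | succ f =>
        simp only [List.cons_append, bfsLoopA, bfsInnerB, if_pos hk]
        split
        · exact ih f vis ord nx
        · rw [PySem.List.foldl_append_if_eq_filter, List.append_assoc]
          exact ih f _ _ _
    · simp only [List.cons_append, bfsInnerB, if_neg hk]
      rw [bfsLoopA_of_full adj exc k fuel vis ord _ hk]
      exact (bfsLoopA_of_full adj exc k fuel vis ord nx hk).symm

-- the whole simulation: A's loop equals B's level loop, for every fuel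
theorem bfsLoopA_eq_outer (adj : List (Int × List Int)) (exc : PySem.Set Int) (k : Int) :
    ∀ (fuel : Nat) (fr : List Int) (vis : PySem.Set Int) (ord : List Int),
      bfsLoopA adj exc k fuel vis ord fr = bfsOuterB adj exc k fuel fr vis ord := by
  intro fuel
  induction fuel using Nat.strong_induction_on with
  | _ fuel ih =>
    intro fr vis ord
    cases fr with
    | nil => cases fuel <;> simp [bfsLoopA, bfsOuterB]
    | cons node rest =>
      by_cases hk : (ord.length : Int) < k
      · have h1 := bfsLoopA_eq_inner adj exc k (node :: rest) fuel vis ord []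
        rw [List.append_nil] at h1
        rw [h1]
        rcases hin : bfsInnerB adj exc k (node :: rest) fuel vis ord [] with
          ⟨f', vis', ord', nx', stop⟩
        simp only [hin, bfsOuterB, dif_pos hk]
        cases stop with
        | true => simp
        | false =>
          have hlt : f' < fuel := by
            have := bfsInnerB_fuel_lt adj exc k node rest fuel vis ord [] hk
              (by rw [hin])
            rw [hin] at this; exact this
          simp only [if_neg (by simp : ¬ (false = true))]
          exact ih f' hlt nx' vis' ord'
      · rw [bfsLoopA_of_full adj exc k fuel vis ord _ hk]
        simp [bfsOuterB, hk]

-- ===== VERDICT (by name: the statement is the Claim_ definition above) =====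
theorem bfs_region_py_spec : Claim_equal_bfs_region_py := by
  intro adj start k excluded _
  unfold Spec_bfs_region_py bfs_region_py bfs_region_py_alt
  split_ifs with h
  · rfl
  · exact bfsLoopA_eq_outer adj (pvExcSet excluded) k (pvFuel adj) [start] PySem.Set.empty []
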